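-- pv_equiv track=rewrite | github.com/IamWangYunKai/DG-TrajGen | carla_utils/trajectory/functions/quintic.py | get_pw_index
-- ===== SOURCE A (Python) =====
-- def get_pw_index(t, pw_t0):
-- 	pw_index = None
-- 	for i in range(len(pw_t0)-1, -1, -1):
-- 		t0p = pw_t0[i]
-- 		if t >= t0p:
-- 			pw_index = i
-- 			break
-- 	return pw_index
-- ===== SOURCE B (Python) =====
-- def get_pw_index(t, pw_t0):
-- 	pw_index = None
-- 	for i, t0p in enumerate(pw_t0):
-- 		if t >= t0p:
-- 			pw_index = i
-- 	return pw_index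
-- ===== Notes on version B (the rewrite author's own statement) =====
-- stated objective: simpler
-- what changed: A scans backward over indices with an early break and an indexed lookup; B makes one forward pass over enumerate(pw_t0), keeping the last matching index, with no indexing and no break.
import Mathlib
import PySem

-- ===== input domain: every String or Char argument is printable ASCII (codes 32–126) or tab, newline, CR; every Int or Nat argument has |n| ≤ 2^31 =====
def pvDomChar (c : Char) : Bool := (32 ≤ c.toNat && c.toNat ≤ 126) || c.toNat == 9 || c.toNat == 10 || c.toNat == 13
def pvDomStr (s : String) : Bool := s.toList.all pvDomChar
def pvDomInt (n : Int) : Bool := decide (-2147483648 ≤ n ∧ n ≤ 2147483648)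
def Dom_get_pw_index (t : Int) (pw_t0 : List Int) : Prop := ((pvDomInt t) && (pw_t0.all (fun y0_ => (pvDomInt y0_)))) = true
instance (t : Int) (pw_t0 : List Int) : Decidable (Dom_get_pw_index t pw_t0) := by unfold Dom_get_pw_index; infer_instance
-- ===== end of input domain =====

-- B replaces A's backward indexed scan with an early break by a single forward
-- pass over enumerate keeping the last matching index (objective: simpler).

-- ===== PORT A =====
-- the backward 'for i in range(len(pw_t0)-1, -1, -1)' loop with its break:
-- first index of the countdown list whose element satisfies t >= pw_t0[i]
def get_pw_index_loopA (t : Int) (pw : List Int) : List Int → Option Int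
  | [] => none
  | i :: rest =>
    if t ≥ PySem.List.pyGetD pw i 0 then some i else get_pw_index_loopA t pw rest

def get_pw_index (t : Int) (pw_t0 : List Int) : Option Int :=
  get_pw_index_loopA t pw_t0 (PySem.List.pyRange ((pw_t0.length : Int) - 1) (-1) (-1))

-- ===== PORT B =====
def get_pw_index_alt (t : Int) (pw_t0 : List Int) : Option Int :=
  (PySem.List.enumerate pw_t0 0).foldl
    (fun acc p => if t ≥ p.2 then some p.1 else acc) none

-- ===== PRECONDITION & SPEC =====
def Spec_get_pw_index (t : Int) (pw_t0 : List Int) (out : Option Int) : Prop := out = get_pw_index_alt t pw_t0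
instance (t : Int) (pw_t0 : List Int) (out : Option Int) : Decidable (Spec_get_pw_index t pw_t0 out) := by unfold Spec_get_pw_index; infer_instance

-- ===== CLAIM (what is proved, stated in full; the proofs are below) =====
def Claim_equal_get_pw_index : Prop := ∀ (t : Int) (pw_t0 : List Int), Dom_get_pw_index t pw_t0 → Spec_get_pw_index t pw_t0 (get_pw_index t pw_t0)

-- ===== LEMMAS AND PROOFS =====

-- A's loop only looks up indices inside xs, so appending an element is invisible to it
theorem get_pw_index_loopA_append (t x : Int) (xs : List Int) (l : List Int)
    (h : ∀ i ∈ l, 0 ≤ i ∧ i < (xs.length : Int)) :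
    get_pw_index_loopA t (xs ++ [x]) l = get_pw_index_loopA t xs l := by
  induction l with
  | nil => rfl
  | cons i rest ih =>
    have hi := h i (by simp)
    have hget : PySem.List.pyGetD (xs ++ [x]) i 0 = PySem.List.pyGetD xs i 0 := by
      rw [PySem.List.pyGetD_eq_getElem _ _ hi.1 (by simp; omega),
          PySem.List.pyGetD_eq_getElem _ _ hi.1 (by simpa using hi.2)]
      rw [List.getElem_append_left (by omega)]
    simp only [get_pw_index_loopA, hget]
    split
    · rfl
    · exact ih (fun j hj => h j (by simp [hj]))

theorem get_pw_index_spec_aux (t : Int) (pw_t0 : List Int) :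
    get_pw_index t pw_t0 = get_pw_index_alt t pw_t0 := by
  induction pw_t0 using List.reverseRecOn with
  | nil =>
    simp [get_pw_index, get_pw_index_alt, PySem.List.pyRange_neg_one_eq_nil,
      PySem.List.enumerate_nil, get_pw_index_loopA]
  | append_singleton xs x ih =>
    have hn : (-1 : Int) < (xs.length : Int) := by omega
    have hrange : PySem.List.pyRange (((xs ++ [x]).length : Int) - 1) (-1) (-1)
        = (xs.length : Int) :: PySem.List.pyRange ((xs.length : Int) - 1) (-1) (-1) := by
      have h1 : (((xs ++ [x]).length : Int) - 1) = (xs.length : Int) := by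
        push_cast [List.length_append]; simp
      rw [h1, PySem.List.pyRange_neg_one_cons hn]
    have hlast : PySem.List.pyGetD (xs ++ [x]) (xs.length : Int) 0 = x := by
      rw [PySem.List.pyGetD_eq_getElem _ _ (by omega) (by simp)]
      simp
    unfold get_pw_index
    rw [hrange]
    simp only [get_pw_index_loopA, hlast]
    rw [get_pw_index_loopA_append t x xs _
        (fun i hi => by
          have := (PySem.List.mem_pyRange_neg_one.mp hi)
          constructor <;> omega)]
    unfold get_pw_index_alt
    rw [PySem.List.enumerate_append]
    simp only [PySem.List.enumerate_cons, PySem.List.enumerate_nil, List.foldl_append,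
      List.foldl_cons, List.foldl_nil, Int.zero_add]
    by_cases hx : t ≥ x
    · simp [hx]
    · simp only [if_neg hx]
      have h2 := ih
      unfold get_pw_index get_pw_index_alt at h2
      exact h2

-- ===== VERDICT (by name: the statement is the Claim_ definition above) =====
theorem get_pw_index_spec : Claim_equal_get_pw_index := by
  intro t pw_t0 _
  exact get_pw_index_spec_aux t pw_t0
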